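-- pv_equiv track=rewrite | github.com/olivia-rippee/Python-for-Computational-Biology-and-Bioinformatics | Bioinformatics VI - Finding Mutations in DNA and Proteins/3 Speeding Up Burrows-Wheeler Read Mapping.py | SuffixArrayK
-- ===== SOURCE A (Python) =====
-- def SuffixArrayK(Text, k):
--     '''Construct a partial suffix array to save memory by retaining only the
--     elements of full array that are divisible by k, along with their indices i.
--
--     Input: A string Text and a positive integer k.
--     Output: SuffixArrayk(Text), in the form of a list of ordered pairs
--     (i, SuffixArray(i)) for all nonempty entries in the partial suffix array.'''
--
--
--     # Step 1: Build full suffix array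
--     suffixes = [(Text[i:], i) for i in range(len(Text))]
--     suffixes.sort()
--     full_suffix_array = [index for (suffix, index) in suffixes]
--
--     # Step 2: Create partial suffix array for indices divisible by k
--     partial_suffix_array = []
--     for i, suffix_index in enumerate(full_suffix_array):
--         if suffix_index % k == 0:
--             partial_suffix_array.append((i, suffix_index))
--
--     return partial_suffix_array
-- ===== SOURCE B (Python) =====
-- def SuffixArrayK(Text, k):
--     # Rank-counting: for each index j divisible by k, its suffix-array position
--     # is the number of suffixes strictly smaller than Text[j:]; no full sort.
--     n = len(Text)
--     pairs = []
--     for j in range(n):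
--         if j % k == 0:
--             rank = sum(1 for i in range(n) if Text[i:] < Text[j:])
--             pairs.append((rank, j))
--     pairs.sort()
--     return pairs
-- ===== Notes on version B (the rewrite author's own statement) =====
-- stated objective: alternative
-- what changed: Instead of materialising and sorting all n suffixes and then scanning the enumerated full suffix array, B computes for each index j divisible by k its suffix-array position directly as the count of lexicographically smaller suffixes, and only sorts the (n/k)-sized result list.
import Mathlib
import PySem

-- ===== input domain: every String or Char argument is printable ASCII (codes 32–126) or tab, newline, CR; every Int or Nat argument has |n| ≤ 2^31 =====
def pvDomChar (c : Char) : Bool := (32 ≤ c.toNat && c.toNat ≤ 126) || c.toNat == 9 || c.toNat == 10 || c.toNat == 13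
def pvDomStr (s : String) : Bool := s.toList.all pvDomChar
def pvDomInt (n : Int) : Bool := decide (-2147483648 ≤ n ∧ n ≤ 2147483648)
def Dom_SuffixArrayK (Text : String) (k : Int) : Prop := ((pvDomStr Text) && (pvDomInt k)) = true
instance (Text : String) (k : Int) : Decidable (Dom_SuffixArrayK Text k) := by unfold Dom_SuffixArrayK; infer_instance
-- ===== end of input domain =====

-- B replaces sort-all-suffixes-then-scan by direct rank counting per selected index (alternative algorithm, not claimed faster).


-- ===== PORT A =====
def SuffixArrayK (Text : String) (k : Int) : List (Int × Int) :=
  -- suffixes = [(Text[i:], i) for i in range(len(Text))]; suffixes.sort()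
  let suffixes : List (String × Int) :=
    (PySem.List.pyRange 0 (PySem.Str.len Text) 1).map
      (fun i => (PySem.Str.slice Text (some i) none, i))
  let sortedSuffixes := PySem.List.sorted2 suffixes (fun p => p.1) (fun p => p.2)
  let fullSuffixArray := sortedSuffixes.map (fun p => p.2)
  -- for i, suffix_index in enumerate(full): if suffix_index % k == 0: append((i, suffix_index))
  (PySem.List.enumerate fullSuffixArray).foldl
    (fun acc pr => if PySem.Int.mod pr.2 k == 0 then acc ++ [(pr.1, pr.2)] else acc) []

-- ===== PORT B =====
def SuffixArrayK_alt (Text : String) (k : Int) : List (Int × Int) :=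
  let n := PySem.Str.len Text
  -- for j in range(n): if j % k == 0: rank = sum(1 for i in range(n) if Text[i:] < Text[j:]); append((rank, j))
  let pairs : List (Int × Int) :=
    (PySem.List.pyRange 0 n 1).foldl
      (fun acc j =>
        if PySem.Int.mod j k == 0 then
          acc ++ [(((PySem.List.pyRange 0 n 1).map
              (fun i => if PySem.Str.slice Text (some i) none < PySem.Str.slice Text (some j) none
                        then (1 : Int) else 0)).sum, j)]
        else acc) []
  -- pairs.sort()
  PySem.List.sorted2 pairs (fun p => p.1) (fun p => p.2)

-- ===== PRECONDITION & SPEC =====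
-- Pre_ excludes only k = 0 with nonempty Text, where Python A raises ZeroDivisionError (suffix_index % 0).
def Pre_SuffixArrayK (Text : String) (k : Int) : Prop := Text = "" ∨ k ≠ 0
instance (Text : String) (k : Int) : Decidable (Pre_SuffixArrayK Text k) := by unfold Pre_SuffixArrayK; infer_instance
def pvWitness_SuffixArrayK : String × Int := ("abaab", 2)

def Spec_SuffixArrayK (Text : String) (k : Int) (out : List (Int × Int)) : Prop := out = SuffixArrayK_alt Text k
instance (Text : String) (k : Int) (out : List (Int × Int)) : Decidable (Spec_SuffixArrayK Text k out) := by unfold Spec_SuffixArrayK; infer_instance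

-- ===== CLAIM (what is proved, stated in full; the proofs are below) =====
def Claim_equal_SuffixArrayK : Prop := ∀ (Text : String) (k : Int), Dom_SuffixArrayK Text k → Pre_SuffixArrayK Text k → Spec_SuffixArrayK Text k (SuffixArrayK Text k)

-- ===== LEMMAS AND PROOFS =====

-- insertBy only looks at `before` on the inserted element vs members of the accumulator
theorem pv_insertBy_congr {α : Type} (f g : α → α → Bool) (x : α) (ys : List α)
    (h : ∀ b ∈ ys, f x b = g x b) :
    PySem.List.insertBy f x ys = PySem.List.insertBy g x ys := by
  induction ys with
  | nil => rfl
  | cons y ys ih =>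
      simp only [PySem.List.insertBy]
      rw [h y (by simp)]
      by_cases hg : g x y = true
      · simp [hg]
      · simp [hg, ih (fun b hb => h b (by simp [hb]))]

theorem pv_foldl_insertBy_congr {α : Type} (f g : α → α → Bool) (xs : List α) :
    ∀ acc : List α, (∀ a ∈ xs, ∀ b ∈ acc, f a b = g a b) →
    (∀ a ∈ xs, ∀ b ∈ xs, f a b = g a b) →
    xs.foldl (fun acc x => PySem.List.insertBy f x acc) acc
      = xs.foldl (fun acc x => PySem.List.insertBy g x acc) acc := by
  induction xs with
  | nil => intro acc _ _; rfl
  | cons x0 xs0 ih =>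
      intro acc hacc hxs
      simp only [List.foldl_cons]
      rw [pv_insertBy_congr f g x0 acc (hacc x0 (by simp))]
      refine ih (PySem.List.insertBy g x0 acc) ?_ ?_
      · intro a' ha' b hb
        rcases (PySem.List.mem_insertBy g x0 b acc).1 hb with hb' | hb'
        · subst hb'; exact hxs a' (by simp [ha']) b (by simp)
        · exact hacc a' (by simp [ha']) b hb'
      · intro a' ha' b hb
        exact hxs a' (by simp [ha']) b (by simp [hb])

-- sorted2 collapses to sorted with a single linear-order key when the stated Boolean agrees
theorem pv_sorted2_eq_sorted {α κ₁ κ₂ κ : Type} [LT κ₁] [DecidableLT κ₁] [LT κ₂] [DecidableLT κ₂]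
    [LinearOrder κ] (xs : List α) (k1 : α → κ₁) (k2 : α → κ₂) (key : α → κ)
    (h : ∀ a ∈ xs, ∀ b ∈ xs,
      (decide (k1 a < k1 b) || (!decide (k1 b < k1 a) && decide (k2 a < k2 b))) = decide (key a < key b)) :
    PySem.List.sorted2 xs k1 k2 = PySem.List.sorted xs key := by
  simp only [PySem.List.sorted2, PySem.List.sorted, if_neg (by simp : ¬ (false = true))]
  exact pv_foldl_insertBy_congr _ _ xs [] (by simp) h

-- counting characterisation of positions in a strictly key-sorted list
theorem pv_countP_lt_getElem {α κ : Type} [LinearOrder κ] (S : List α) (key : α → κ)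
    (hS : S.Pairwise (fun a b => key a < key b)) (p : Nat) (hp : p < S.length) :
    S.countP (fun x => decide (key x < key S[p])) = p := by
  induction S generalizing p with
  | nil => simp at hp
  | cons a S ih =>
      match p with
      | 0 =>
          simp only [List.getElem_cons_zero, List.countP_cons]
          have h1 : S.countP (fun x => decide (key x < key a)) = 0 := by
            rw [List.countP_eq_zero]
            intro x hx
            simp only [decide_eq_true_eq]
            exact not_lt_of_gt ((List.pairwise_cons.1 hS).1 x hx)
          simp
          exact fun x hx => le_of_lt ((List.pairwise_cons.1 hS).1 x hx)
      | p + 1 =>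
          have hp' : p < S.length := by simpa using hp
          simp only [List.getElem_cons_succ, List.countP_cons]
          have hSp : S.Pairwise (fun a b => key a < key b) := (List.pairwise_cons.1 hS).2
          have h1 := ih hSp p hp'
          have h2 : key a < key S[p] :=
            (List.pairwise_cons.1 hS).1 _ (S.getElem_mem hp')
          simp [h2]
          exact h1

-- abbreviations for the proof (used only below the claim block)
def pvRg (Text : String) : List Int := PySem.List.pyRange 0 (PySem.Str.len Text) 1
def pvSfx (Text : String) (i : Int) : String := PySem.Str.slice Text (some i) none
def pvSuffixes (Text : String) : List (String × Int) := (pvRg Text).map (fun i => (pvSfx Text i, i))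
@[reducible] def pvDecLT : DecidableLT (List Char) := LinearOrder.toDecidableLT
def pvS (Text : String) : List (String × Int) :=
  @PySem.List.sorted (String × Int) (List Char) List.instLT pvDecLT (pvSuffixes Text) (fun p => p.1.toList) false
def pvRank (Text : String) (j : Int) : Nat :=
  (pvRg Text).countP (fun i => decide (pvSfx Text i < pvSfx Text j))
def pvG (Text : String) (j : Int) : Int × Int := ((pvRank Text j : Int), j)

theorem pv_sfx_toList (Text : String) (i : Int) (hi : 0 ≤ i) :
    (pvSfx Text i).toList = Text.toList.drop i.toNat := by
  simp [pvSfx, PySem.Str.toList_slice, PySem.Chars.slice_eq_listSlice, PySem.List.slice_from _ hi]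

theorem pv_mem_rg (Text : String) (i : Int) (hi : i ∈ pvRg Text) :
    0 ≤ i ∧ i < (Text.toList.length : Int) := by
  have := PySem.List.mem_pyRange_one.1 hi
  simpa [PySem.Str.len_eq] using this

theorem pv_sfx_inj (Text : String) (i j : Int) (hi : i ∈ pvRg Text) (hj : j ∈ pvRg Text)
    (h : (pvSfx Text i).toList = (pvSfx Text j).toList) : i = j := by
  obtain ⟨hi0, hi1⟩ := pv_mem_rg Text i hi
  obtain ⟨hj0, hj1⟩ := pv_mem_rg Text j hj
  rw [pv_sfx_toList Text i hi0, pv_sfx_toList Text j hj0] at h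
  have hl := congrArg List.length h
  simp only [List.length_drop] at hl
  omega

theorem pv_str_trans {s t u : String} (h1 : s < t) (h2 : t < u) : s < u := by
  rw [String.lt_iff_toList_lt] at *
  exact lt_trans h1 h2

theorem pv_rank_lt (Text : String) (i j : Int) (hi : i ∈ pvRg Text) (_hj : j ∈ pvRg Text)
    (h : pvSfx Text i < pvSfx Text j) : pvRank Text i < pvRank Text j := by
  obtain ⟨l₁, l₂, hsplit⟩ := List.append_of_mem hi
  unfold pvRank
  rw [hsplit]
  simp only [List.countP_append, List.countP_cons]
  have hii : (decide (pvSfx Text i < pvSfx Text i)) = false := by simp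
  have hij : (decide (pvSfx Text i < pvSfx Text j)) = true := by simpa using h
  have m1 : List.countP (fun x => decide (pvSfx Text x < pvSfx Text i)) l₁
      ≤ List.countP (fun x => decide (pvSfx Text x < pvSfx Text j)) l₁ :=
    List.countP_mono_left (fun x _ hx => by
      simp only [decide_eq_true_eq] at hx ⊢
      exact pv_str_trans hx h)
  have m2 : List.countP (fun x => decide (pvSfx Text x < pvSfx Text i)) l₂
      ≤ List.countP (fun x => decide (pvSfx Text x < pvSfx Text j)) l₂ :=
    List.countP_mono_left (fun x _ hx => by
      simp only [decide_eq_true_eq] at hx ⊢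
      exact pv_str_trans hx h)
  rw [hii, hij]
  have e0 : (if (false = true) then (1:Nat) else 0) = 0 := rfl
  have e1 : (if (true = true) then (1:Nat) else 0) = 1 := rfl
  rw [e0, e1]
  omega

theorem pv_rank_inj (Text : String) (i j : Int) (hi : i ∈ pvRg Text) (hj : j ∈ pvRg Text)
    (h : pvRank Text i = pvRank Text j) : i = j := by
  rcases lt_trichotomy ((pvSfx Text i).toList) ((pvSfx Text j).toList) with hlt | heq | hgt
  · exact absurd h (Nat.ne_of_lt (pv_rank_lt Text i j hi hj (String.lt_iff_toList_lt.2 hlt)))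
  · exact pv_sfx_inj Text i j hi hj heq
  · exact absurd h.symm (Nat.ne_of_lt (pv_rank_lt Text j i hj hi (String.lt_iff_toList_lt.2 hgt)))

theorem pv_mem_suffixes (Text : String) (x : String × Int) (hx : x ∈ pvSuffixes Text) :
    x.2 ∈ pvRg Text ∧ x.1 = pvSfx Text x.2 := by
  obtain ⟨i, hi, rfl⟩ := List.mem_map.1 hx
  exact ⟨hi, rfl⟩

theorem pv_S_perm (Text : String) : (pvS Text).Perm (pvSuffixes Text) :=
  @PySem.List.sorted_perm (String × Int) (List Char) List.instLT pvDecLT (pvSuffixes Text) (fun p => p.1.toList) false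

theorem pv_S_pairwise (Text : String) :
    (pvS Text).Pairwise (fun a b => a.1.toList < b.1.toList) := by
  have hle : (pvS Text).Pairwise (fun a b => a.1.toList ≤ b.1.toList) := by
    unfold pvS
    exact PySem.List.sorted_pairwise (pvSuffixes Text) (fun p : String × Int => p.1.toList)
  have hrg : (pvRg Text).Nodup := PySem.List.nodup_pyRange_one _ _
  have heq : (pvSuffixes Text).map (fun p => p.1.toList)
      = (pvRg Text).map (fun i => (pvSfx Text i).toList) := by
    simp [pvSuffixes, List.map_map, Function.comp]
  have hnd : ((pvSuffixes Text).map (fun p => p.1.toList)).Nodup := by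
    rw [heq]
    exact (List.nodup_map_iff_inj_on hrg).2 (fun x hx y hy hxy => pv_sfx_inj Text x y hx hy hxy)
  have hndS : ((pvS Text).map (fun p => p.1.toList)).Nodup :=
    (((pv_S_perm Text).map _).nodup_iff).2 hnd
  have hne : (pvS Text).Pairwise (fun a b => a.1.toList ≠ b.1.toList) :=
    List.pairwise_map.1 hndS
  exact (hle.and hne).imp (fun h => lt_of_le_of_ne h.1 h.2)

theorem pv_rank_getElem (Text : String) (p : Nat) (hp : p < (pvS Text).length) :
    pvRank Text ((pvS Text)[p].2) = p := by
  have hmem : (pvS Text)[p] ∈ pvSuffixes Text :=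
    (pv_S_perm Text).mem_iff.1 (List.getElem_mem hp)
  obtain ⟨hrg, hfst⟩ := pv_mem_suffixes Text _ hmem
  have h1 : pvRank Text ((pvS Text)[p].2)
      = (pvRg Text).countP (fun i => decide ((pvSfx Text i).toList < ((pvS Text)[p]).1.toList)) := by
    unfold pvRank
    refine List.countP_congr (fun x hx => ?_)
    simp only [decide_eq_true_eq]
    rw [hfst, String.lt_iff_toList_lt]
  have h2 : (pvSuffixes Text).countP (fun x => decide (x.1.toList < ((pvS Text)[p]).1.toList))
      = (pvRg Text).countP (fun i => decide ((pvSfx Text i).toList < ((pvS Text)[p]).1.toList)) := by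
    unfold pvSuffixes
    rw [List.countP_map]
    exact List.countP_congr (fun x _ => Iff.rfl)
  have h3 : (pvS Text).countP (fun x => decide (x.1.toList < ((pvS Text)[p]).1.toList))
      = (pvSuffixes Text).countP (fun x => decide (x.1.toList < ((pvS Text)[p]).1.toList)) :=
    (pv_S_perm Text).countP_eq _
  rw [h1, ← h2, ← h3]
  have h5 := pv_countP_lt_getElem (pvS Text) (fun x : String × Int => x.1.toList) (pv_S_pairwise Text) p hp
  refine Eq.trans ?_ h5
  refine List.countP_congr (fun x hx => ?_)
  simp only [decide_eq_true_eq]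

theorem pv_sum_ite {α : Type} (P : α → Prop) [DecidablePred P] (l : List α) :
    (l.map (fun x => if P x then (1:Int) else 0)).sum
      = ((l.countP (fun x => decide (P x)) : Nat) : Int) := by
  induction l with
  | nil => simp
  | cons a l ih =>
      simp only [List.map_cons, List.sum_cons, List.countP_cons, ih]
      by_cases h : P a
      · simp [h]
        ring
      · simp [h]

theorem SuffixArrayK_eq_alt (Text : String) (k : Int) :
    SuffixArrayK Text k = SuffixArrayK_alt Text k := by
  have hS2 : PySem.List.sorted2 (pvSuffixes Text) (fun p => p.1) (fun p => p.2) = pvS Text := by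
    unfold pvS
    refine pv_sorted2_eq_sorted (pvSuffixes Text) _ _ (fun p => p.1.toList) ?_
    intro a ha b hb
    rcases lt_trichotomy (a.1.toList) (b.1.toList) with h | h | h
    · have h1 : a.1 < b.1 := String.lt_iff_toList_lt.2 h
      simp [h, h1]
    · have hab : a = b := by
        obtain ⟨ha2, ha1⟩ := pv_mem_suffixes Text a ha
        obtain ⟨hb2, hb1⟩ := pv_mem_suffixes Text b hb
        have h22 : a.2 = b.2 := pv_sfx_inj Text a.2 b.2 ha2 hb2 (by rw [← ha1, ← hb1]; exact h)
        have h11 : a.1 = b.1 := by rw [ha1, hb1, h22]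
        exact Prod.ext h11 h22
      subst hab
      simp
    · have h1 : ¬ a.1 < b.1 := by rw [String.lt_iff_toList_lt]; exact not_lt_of_gt h
      have h2 : b.1 < a.1 := String.lt_iff_toList_lt.2 h
      simp [h1, h2, not_lt_of_gt h]
  have hA : SuffixArrayK Text k
      = (PySem.List.enumerate ((pvS Text).map (fun p => p.2))).filter
          (fun pr => PySem.Int.mod pr.2 k == 0) := by
    show (PySem.List.enumerate ((PySem.List.sorted2 (pvSuffixes Text) (fun p => p.1) (fun p => p.2)).map
        (fun p => p.2))).foldl
        (fun acc pr => if PySem.Int.mod pr.2 k == 0 then acc ++ [(pr.1, pr.2)] else acc) [] = _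
    rw [hS2]
    rw [PySem.List.foldl_append_if (fun pr : Int × Int => PySem.Int.mod pr.2 k == 0)
        (fun pr : Int × Int => (pr.1, pr.2)) _ []]
    simp
  have hEnum : PySem.List.enumerate ((pvS Text).map (fun p => p.2))
      = ((pvS Text).map (fun p => p.2)).map (pvG Text) := by
    apply List.ext_getElem
    · simp [PySem.List.length_enumerate]
    · intro p h1 h2
      have hp : p < (pvS Text).length := by simpa using h2
      rw [PySem.List.getElem_enumerate _ _ p h1]
      simp only [List.getElem_map]
      unfold pvG
      rw [pv_rank_getElem Text p hp]
      simp
  have hA2 : SuffixArrayK Text k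
      = (((pvS Text).map (fun p => p.2)).filter (fun j => PySem.Int.mod j k == 0)).map (pvG Text) := by
    rw [hA, hEnum, List.filter_map]
    rfl
  have hB1 : SuffixArrayK_alt Text k
      = PySem.List.sorted2 (((pvRg Text).filter (fun j => PySem.Int.mod j k == 0)).map (pvG Text))
          (fun p => p.1) (fun p => p.2) := by
    show PySem.List.sorted2 ((pvRg Text).foldl
        (fun acc j => if PySem.Int.mod j k == 0 then
          acc ++ [(((pvRg Text).map (fun i => if pvSfx Text i < pvSfx Text j then (1:Int) else 0)).sum, j)]
        else acc) []) (fun p => p.1) (fun p => p.2) = _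
    rw [PySem.List.foldl_append_if (fun j => PySem.Int.mod j k == 0)
        (fun j => (((pvRg Text).map (fun i => if pvSfx Text i < pvSfx Text j then (1:Int) else 0)).sum, j))
        (pvRg Text) []]
    simp only [List.nil_append]
    congr 1
    refine List.map_congr_left (fun j hj => ?_)
    rw [pv_sum_ite (fun i => pvSfx Text i < pvSfx Text j) (pvRg Text)]
    rfl
  have hBp : ∀ x ∈ ((pvRg Text).filter (fun j => PySem.Int.mod j k == 0)).map (pvG Text),
      x.2 ∈ pvRg Text ∧ x = pvG Text x.2 := by
    intro x hx
    obtain ⟨j, hj, rfl⟩ := List.mem_map.1 hx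
    exact ⟨(List.mem_filter.1 hj).1, rfl⟩
  have hB2 : PySem.List.sorted2 (((pvRg Text).filter (fun j => PySem.Int.mod j k == 0)).map (pvG Text))
        (fun p => p.1) (fun p => p.2)
      = PySem.List.sorted (((pvRg Text).filter (fun j => PySem.Int.mod j k == 0)).map (pvG Text))
        (fun p => p.1) := by
    refine pv_sorted2_eq_sorted _ _ _ _ ?_
    intro a ha b hb
    rcases lt_trichotomy a.1 b.1 with h | h | h
    · simp [h]
    · have hab : a = b := by
        obtain ⟨ha2, ha1⟩ := hBp a ha
        obtain ⟨hb2, hb1⟩ := hBp b hb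
        have hr : pvRank Text a.2 = pvRank Text b.2 := by
          have e1 : a.1 = ((pvRank Text a.2 : Nat) : Int) := by rw [ha1]; rfl
          have e2 : b.1 = ((pvRank Text b.2 : Nat) : Int) := by rw [hb1]; rfl
          have := e1 ▸ e2 ▸ h
          exact_mod_cast this
        have h22 : a.2 = b.2 := pv_rank_inj Text a.2 b.2 ha2 hb2 hr
        rw [ha1, hb1, h22]
      subst hab
      simp
    · have h1 : (decide (a.1 < b.1)) = false := by simp [not_lt_of_gt h]
      have h2 : (decide (b.1 < a.1)) = true := by simp [h]
      rw [h1, h2]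
      simp
  have hfullperm : ((pvS Text).map (fun p => p.2)).Perm (pvRg Text) := by
    have h1 := (pv_S_perm Text).map (fun p : String × Int => p.2)
    have h2 : (pvSuffixes Text).map (fun p : String × Int => p.2) = pvRg Text := by
      unfold pvSuffixes
      rw [List.map_map]
      simp [Function.comp_def]
    rwa [h2] at h1
  have hperm : ((((pvS Text).map (fun p => p.2)).filter (fun j => PySem.Int.mod j k == 0)).map (pvG Text)).Perm
      (((pvRg Text).filter (fun j => PySem.Int.mod j k == 0)).map (pvG Text)) :=
    (hfullperm.filter _).map _
  have hpw : ((((pvS Text).map (fun p => p.2)).filter (fun j => PySem.Int.mod j k == 0)).map (pvG Text)).Pairwise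
      (fun a b => a.1 < b.1) := by
    have h1 : (SuffixArrayK Text k).Pairwise (fun a b : Int × Int => a.1 < b.1) := by
      rw [hA]
      exact (PySem.List.pairwise_lt_enumerate _ _).filter _
    rwa [hA2] at h1
  have hfinal : PySem.List.sorted (((pvRg Text).filter (fun j => PySem.Int.mod j k == 0)).map (pvG Text))
        (fun p => p.1)
      = (((pvS Text).map (fun p => p.2)).filter (fun j => PySem.Int.mod j k == 0)).map (pvG Text) :=
    PySem.List.sorted_eq_of_perm_of_pairwise_lt _ _ _ hperm hpw
  rw [hA2, hB1, hB2, hfinal]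

-- ===== VERDICT (by name: the statement is the Claim_ definition above) =====
theorem SuffixArrayK_spec : Claim_equal_SuffixArrayK := by
  intro Text k _ _
  unfold Spec_SuffixArrayK
  exact SuffixArrayK_eq_alt Text k
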